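-- pv_equiv track=rewrite | github.com/chewingram/my_utils | my_utils/utils_cross_validation.py | kfold_ind
-- ===== SOURCE A (Python) =====
-- def kfold_ind(size, k):
--     '''
--     Given the size of a dataset (size) and the number of folds (k), return a list containing the indices of the dataset
--     of the last configuration of the corresponding fold. E.g. [11, 23] for a dataset of 34 confs means that
--     there are three folds: the first is 0th-11th, the second fold is 12th-23rd and the last one is 24th-33rd. If size is not
--     a mutiple of k, after distributing int(size/k) confs to each fold, an extra conf is given to the first
--     size%k folds.
--     Arguments:
--     size(int): size of the dataset
--     k(int): number of folds
--     '''
--     fold_sizes = []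
--     for i in range(k):
--         fold_sizes.append(int(size/k))
--         if size%k != 0 and i < size%k:
--             fold_sizes[-1] += 1
--     ind_list = [fold_sizes[0] - 1]
--     for i in range(1, len(fold_sizes) - 1):
--         ind_list.append(ind_list[-1] + fold_sizes[i])
--     return fold_sizes, ind_list
-- ===== SOURCE B (Python) =====
-- def kfold_ind(size, k):
--     rem = size % k
--     base = int(size / k)
--     fold_sizes = [base + (1 if rem != 0 and i < rem else 0) for i in range(k)]
--     ind_list = [fold_sizes[0] - 1] + [(i + 1) * base + min(i + 1, rem) - 1
--                                       for i in range(1, k - 1)]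
--     return fold_sizes, ind_list
-- ===== Notes on version B (the rewrite author's own statement) =====
-- stated objective: simpler
-- what changed: B replaces A's two accumulating loops (append-then-increment-last, and a running-sum boundary list) by a comprehension for the fold sizes and a closed-form expression (i+1)*base + min(i+1, rem) - 1 for each boundary, with no running accumulator.
import Mathlib
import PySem

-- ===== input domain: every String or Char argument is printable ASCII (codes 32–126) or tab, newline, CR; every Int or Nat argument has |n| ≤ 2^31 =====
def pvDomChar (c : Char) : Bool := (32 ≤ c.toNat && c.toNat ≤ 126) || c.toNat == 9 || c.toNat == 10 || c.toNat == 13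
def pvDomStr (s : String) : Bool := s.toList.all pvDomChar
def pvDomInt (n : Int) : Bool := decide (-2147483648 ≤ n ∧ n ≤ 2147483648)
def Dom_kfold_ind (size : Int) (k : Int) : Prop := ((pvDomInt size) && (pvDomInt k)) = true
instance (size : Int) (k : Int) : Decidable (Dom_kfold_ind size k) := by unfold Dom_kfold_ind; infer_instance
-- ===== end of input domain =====

-- B computes each fold boundary by the closed form (i+1)*base + min(i+1, rem) - 1 instead of A's
-- running-sum loops; objective: simpler. Equivalence proved for k ≥ 1 (A raises IndexError for k ≤ 0).


-- ===== PORT A =====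
-- int(size/k) is Python float division then truncation toward zero; on Dom (|size|, |k| ≤ 2^31)
-- the rounded quotient never crosses an integer, so it is exactly Int.tdiv (truncated division).
def kfold_ind (size : Int) (k : Int) : List Int × List Int :=
  let fold_sizes := (PySem.List.pyRange 0 k 1).foldl (fun fs i =>
      let fs := fs ++ [size.tdiv k]
      if PySem.Int.mod size k ≠ 0 ∧ i < PySem.Int.mod size k then
        fs.dropLast ++ [PySem.List.pyGetD fs (-1) 0 + 1]
      else fs) []
  match PySem.List.pyGet? fold_sizes 0 with
  | none => ([], [])   -- fold_sizes[0] raises IndexError (k ≤ 0); excluded by Pre_kfold_ind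
  | some f0 =>
    let ind_list := (PySem.List.pyRange 1 ((fold_sizes.length : Int) - 1) 1).foldl
      (fun il i => il ++ [PySem.List.pyGetD il (-1) 0 + PySem.List.pyGetD fold_sizes i 0]) [f0 - 1]
    (fold_sizes, ind_list)

-- ===== PORT B =====
def kfold_ind_alt (size : Int) (k : Int) : List Int × List Int :=
  let rem := PySem.Int.mod size k      -- size % k raises ZeroDivisionError for k = 0; excluded by Pre_kfold_ind
  let base := size.tdiv k              -- int(size/k), exact on Dom as in port A
  let fold_sizes := (PySem.List.pyRange 0 k 1).map (fun i =>
      base + (if rem ≠ 0 ∧ i < rem then 1 else 0))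
  match PySem.List.pyGet? fold_sizes 0 with
  | none => ([], [])   -- fold_sizes[0] raises IndexError (k < 0); excluded by Pre_kfold_ind
  | some f0 =>
    (fold_sizes, (f0 - 1) :: (PySem.List.pyRange 1 (k - 1) 1).map
      (fun i => (i + 1) * base + min (i + 1) rem - 1))

-- ===== PRECONDITION & SPEC =====
-- A raises (IndexError on fold_sizes[0]) exactly when k ≤ 0; Pre_ admits every input A returns on.
def Pre_kfold_ind (size : Int) (k : Int) : Prop := 1 ≤ k
instance (size : Int) (k : Int) : Decidable (Pre_kfold_ind size k) := by unfold Pre_kfold_ind; infer_instance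
def pvWitness_kfold_ind : Int × Int := (34, 3)
def Spec_kfold_ind (size : Int) (k : Int) (out : List Int × List Int) : Prop := out = kfold_ind_alt size k
instance (size : Int) (k : Int) (out : List Int × List Int) : Decidable (Spec_kfold_ind size k out) := by unfold Spec_kfold_ind; infer_instance

-- ===== CLAIM (what is proved, stated in full; the proofs are below) =====
def Claim_equal_kfold_ind : Prop := ∀ (size : Int) (k : Int), Dom_kfold_ind size k → Pre_kfold_ind size k → Spec_kfold_ind size k (kfold_ind size k)

-- ===== LEMMAS AND PROOFS =====

theorem loop_closed_form (f g : Int → Int) (k : Int)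
    (hfg : ∀ a : Int, 1 ≤ a → a < k → g (a - 1) + f a = g a) :
    ∀ (n : Nat) (a : Int) (acc : List Int), 1 ≤ a → a + n ≤ k →
      PySem.List.pyGetD acc (-1) 0 = g (a - 1) →
      (PySem.List.pyRange a (a + n) 1).foldl
          (fun il i => il ++ [PySem.List.pyGetD il (-1) 0 + f i]) acc
        = acc ++ (PySem.List.pyRange a (a + n) 1).map g := by
  intro n
  induction n with
  | zero => intro a acc _ _ _; simp
  | succ m ih =>
    intro a acc ha hk hlast
    have hcons : PySem.List.pyRange a (a + (m + 1 : Nat)) 1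
        = a :: PySem.List.pyRange (a + 1) (a + (m + 1 : Nat)) 1 :=
      PySem.List.pyRange_one_cons (by push_cast; omega)
    have hb : a + ((m + 1 : Nat) : Int) = (a + 1) + (m : Nat) := by push_cast; omega
    rw [hcons, List.foldl_cons, List.map_cons, hlast,
      hfg a ha (by push_cast at hk ⊢; omega), hb,
      ih (a + 1) (acc ++ [g a]) (by omega) (by push_cast at hk ⊢; omega)
        (by simp [PySem.List.pyGetD_neg_one_append_singleton])]
    simp

set_option maxHeartbeats 1000000 in
theorem kfold_ind_spec : Claim_equal_kfold_ind := by
  intro size k _ hk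
  have hk' : (1:Int) ≤ k := hk
  unfold Spec_kfold_ind kfold_ind kfold_ind_alt
  simp only []
  set r := PySem.Int.mod size k with hr
  set base := size.tdiv k with hbase
  set f : Int → Int := fun i => base + (if r ≠ 0 ∧ i < r then 1 else 0) with hf
  have hr0 : 0 ≤ r := PySem.Int.mod_nonneg size (by omega : (0:Int) < k)
  have hrk : r < k := PySem.Int.mod_lt size (by omega : (0:Int) < k)
  -- A's first loop builds the same list as B's comprehension
  have hstep : (fun (fs : List Int) (i : Int) =>
      let fs := fs ++ [size.tdiv k]
      if PySem.Int.mod size k ≠ 0 ∧ i < PySem.Int.mod size k then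
        fs.dropLast ++ [PySem.List.pyGetD fs (-1) 0 + 1]
      else fs) = (fun fs i => fs ++ [f i]) := by
    funext fs i
    simp only [← hr, ← hbase, hf, List.dropLast_concat,
      PySem.List.pyGetD_neg_one_append_singleton]
    split <;> simp
  have hfold : (PySem.List.pyRange 0 k 1).foldl (fun fs i =>
      let fs := fs ++ [size.tdiv k]
      if PySem.Int.mod size k ≠ 0 ∧ i < PySem.Int.mod size k then
        fs.dropLast ++ [PySem.List.pyGetD fs (-1) 0 + 1]
      else fs) [] = (PySem.List.pyRange 0 k 1).map f := by
    rw [hstep, PySem.List.foldl_append_singleton_eq_map]; exact List.nil_append _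
  rw [hfold]
  -- the head element
  have hconsk : PySem.List.pyRange 0 k 1 = 0 :: PySem.List.pyRange 1 k 1 :=
    PySem.List.pyRange_one_cons (by omega)
  rw [hconsk]
  simp only [List.map_cons, PySem.List.pyGet?, PySem.List.pyIdx?]
  norm_num
  have hlen2 : ((k.toNat - 1 : Nat) : Int) = k - 1 := by omega
  rw [hlen2]
  -- closed form for the boundaries
  set g : Int → Int := fun i => (i + 1) * base + min (i + 1) r - 1 with hg
  have hfg : ∀ a : Int, 1 ≤ a → a < k → g (a - 1) + f a = g a := by
    intro a ha hak
    simp only [hg, hf, show a - 1 + 1 = a from by ring]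
    split_ifs with h
    · rw [show min (a + 1) r = min a r + 1 from by omega]; ring
    · rw [show min (a + 1) r = min a r from by omega]; ring
  have hgetf : ∀ i : Int, 1 ≤ i → i < k →
      PySem.List.pyGetD (f 0 :: (PySem.List.pyRange 1 k 1).map f) i 0 = f i := by
    intro i h1 h2
    have : f 0 :: (PySem.List.pyRange 1 k 1).map f = (PySem.List.pyRange 0 k 1).map f := by
      rw [hconsk, List.map_cons]
    rw [this, PySem.List.pyGetD_map_pyRange_of_nonneg f k i 0 (by omega) h2]
  have hhead : f 0 - 1 = g 0 := by
    simp only [hf, hg]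
    rcases eq_or_lt_of_le hr0 with h | h
    · simp [← h]
    · simp [h.ne', h]
      omega
  -- run the boundary loop via the closed form
  rcases le_or_gt 2 k with h2 | h2
  · have hn : k - 1 = 1 + ((k - 2).toNat : Int) := by omega
    have := loop_closed_form
      (fun i => PySem.List.pyGetD (f 0 :: (PySem.List.pyRange 1 k 1).map f) i 0) g k
      (by intro a ha hak; simp only [hgetf a ha hak]; exact hfg a ha hak)
      (k - 2).toNat 1 [f 0 - 1] (by omega) (by omega)
      (by simp [PySem.List.pyGetD, PySem.List.pyGet?, PySem.List.pyIdx?, hhead])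
    rw [← hn] at this
    rw [this]
    rfl
  · -- k = 1: both boundary lists are the singleton [f 0 - 1]
    have hk1 : k = 1 := by omega
    subst hk1
    simp [PySem.List.pyRange_one_eq_nil (le_refl (1:Int))]
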